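-- pv_equiv track=rewrite | github.com/huwl404/NiLab | warp/generate_tomostar.py | build_angle_sequence
-- ===== SOURCE A (Python) =====
-- from typing import List
--
-- def build_angle_sequence(total_row: int, increase: int, flip_after: int, direction: str) -> List[float]:
--     """
--     Build angle list length total_row.
--     Pattern: offsets sequence = [0, +1,+2, -1,-2, +3,+4, -3,-4, ...]  (flip_after controls group size)
--     angle = offset * increase
--     'direction' controls which sign-group goes first: 'pos' -> + then - ; 'neg' -> - then +.
--     """
--     if flip_after <= 0:
--         raise ValueError("flip-after must be > 0")
--     if direction not in ("pos", "neg"):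
--         raise ValueError("direction must be 'pos' or 'neg'")
--
--     needed = total_row - 1
--     offsets = [0]
--     k = 1
--     # how many entries would a full block (pos + neg) need?
--     full_block_len = 2 * flip_after
--
--     while needed > 0:
--         block = list(range(k, k + flip_after))
--         if needed >= full_block_len:
--             # can append full block (pos then neg or neg then pos)
--             if direction == "pos":
--                 offsets.extend(block)
--                 offsets.extend([-x for x in block])
--             else:
--                 offsets.extend([-x for x in block])
--                 offsets.extend(block)
--             needed -= full_block_len
--         else:
--             if needed % 2 == 0:
--                 half = needed // 2
--                 if direction == "pos":
--                     offsets.extend(block[:half])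
--                     offsets.extend([-x for x in block[:half]])
--                 else:
--                     offsets.extend([-x for x in block[:half]])
--                     offsets.extend(block[:half])
--                 needed = 0
--             else:
--                 raise ValueError("total-row must be odd")
--         k += flip_after
--
--     angles = [int(o * increase) for o in offsets]
--     return angles
-- ===== SOURCE B (Python) =====
-- from typing import List
--
-- def build_angle_sequence(total_row: int, increase: int, flip_after: int, direction: str) -> List[float]:
--     if flip_after <= 0:
--         raise ValueError("flip-after must be > 0")
--     if direction not in ("pos", "neg"):
--         raise ValueError("direction must be 'pos' or 'neg'")
--     needed = total_row - 1
--     if needed <= 0: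
--         return [0]
--     if needed % 2 == 1:
--         raise ValueError("total-row must be odd")
--     period = 2 * flip_after
--     cut = needed - needed % period      # offsets with index < cut lie in full blocks
--     half = (needed - cut) // 2          # size of each sign group in the partial tail
--     first = 1 if direction == "pos" else -1
--
--     def offset(j: int) -> int:
--         # closed-form offset for position j+1 of the sequence, no blocks built
--         if j < cut:
--             b, r = divmod(j, period)
--             sign = first if r < flip_after else -first
--             return sign * (b * flip_after + r % flip_after + 1)
--         r = j - cut
--         sign = first if r < half else -first
--         return sign * (cut // 2 + r % half + 1)
--
--     return [0] + [int(offset(j) * increase) for j in range(needed)]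
-- ===== Notes on version B (the rewrite author's own statement) =====
-- stated objective: alternative
-- what changed: Replaces A's sequential block-appending loop by a closed-form per-index formula: each position j is mapped directly to its signed offset via divmod arithmetic (block, sign half, magnitude), so no blocks are built or concatenated.
import Mathlib
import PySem

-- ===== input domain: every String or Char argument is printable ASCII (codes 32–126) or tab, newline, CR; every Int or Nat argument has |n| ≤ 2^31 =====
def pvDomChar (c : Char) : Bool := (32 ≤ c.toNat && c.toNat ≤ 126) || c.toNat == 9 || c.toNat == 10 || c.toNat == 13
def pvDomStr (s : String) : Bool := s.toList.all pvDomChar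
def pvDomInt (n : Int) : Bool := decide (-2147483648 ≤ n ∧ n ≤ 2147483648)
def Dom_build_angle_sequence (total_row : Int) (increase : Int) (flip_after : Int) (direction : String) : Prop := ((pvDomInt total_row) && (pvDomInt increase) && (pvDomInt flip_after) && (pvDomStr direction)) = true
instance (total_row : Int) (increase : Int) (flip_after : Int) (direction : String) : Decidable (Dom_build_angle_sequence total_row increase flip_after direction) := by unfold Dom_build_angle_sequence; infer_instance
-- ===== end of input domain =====

-- B replaces A's sequential block-appending loop by a closed-form per-index formula:
-- each position j is mapped directly to its signed offset by divmod arithmetic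
-- (objective: alternative algorithm, same cost). Raise paths of A are outside Pre_.

-- ===== PORT A =====
-- the while-loop of A: state (needed, k, offsets); fuel bounds the iteration count
-- (needed decreases by 2*flip_after > 0 each full block, then is set to 0), raise paths return offsets as-is
def pvLoopA (fuel : Nat) (needed k flip_after : Int) (direction : String) (offsets : List Int) : List Int :=
  match fuel with
  | 0 => offsets
  | f + 1 =>
    if needed > 0 then
      let block := PySem.List.pyRange k (k + flip_after) 1
      if needed ≥ 2 * flip_after then
        pvLoopA f (needed - 2 * flip_after) (k + flip_after) flip_after direction
          (if direction = "pos" then offsets ++ block ++ block.map (fun x => -x)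
           else offsets ++ block.map (fun x => -x) ++ block)
      else if PySem.Int.mod needed 2 = 0 then
        let half := PySem.Int.floordiv needed 2
        let hb := PySem.List.slice block none (some half)
        pvLoopA f 0 (k + flip_after) flip_after direction
          (if direction = "pos" then offsets ++ hb ++ hb.map (fun x => -x)
           else offsets ++ hb.map (fun x => -x) ++ hb)
      else offsets  -- A raises ValueError here (excluded by Pre_)
    else offsets

def build_angle_sequence (total_row : Int) (increase : Int) (flip_after : Int) (direction : String) : List Int :=
  if flip_after ≤ 0 then []  -- A raises (excluded by Pre_)
  else if ¬(direction = "pos" ∨ direction = "neg") then []  -- A raises (excluded by Pre_)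
  else
    (pvLoopA ((total_row - 1).toNat + 1) (total_row - 1) 1 flip_after direction [0]).map
      (fun o => o * increase)

-- ===== PORT B =====
-- B's inner helper `offset(j)`: the closed-form signed offset at position j+1
def pvOffsetB (cut period fa half first : Int) (j : Int) : Int :=
  if j < cut then
    let b := PySem.Int.floordiv j period
    let r := PySem.Int.mod j period
    (if r < fa then first else -first) * (b * fa + PySem.Int.mod r fa + 1)
  else
    let r := j - cut
    (if r < half then first else -first) * (PySem.Int.floordiv cut 2 + PySem.Int.mod r half + 1)

def build_angle_sequence_alt (total_row : Int) (increase : Int) (flip_after : Int) (direction : String) : List Int :=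
  if flip_after ≤ 0 then []  -- B raises (excluded by Pre_)
  else if ¬(direction = "pos" ∨ direction = "neg") then []  -- B raises (excluded by Pre_)
  else
    let needed := total_row - 1
    if needed ≤ 0 then [0]
    else if PySem.Int.mod needed 2 = 1 then []  -- B raises (excluded by Pre_)
    else
      let period := 2 * flip_after
      let cut := needed - PySem.Int.mod needed period
      let half := PySem.Int.floordiv (needed - cut) 2
      let first : Int := if direction = "pos" then 1 else -1
      [0] ++ (PySem.List.pyRange 0 needed 1).map
        (fun j => pvOffsetB cut period flip_after half first j * increase)

-- ===== PRECONDITION & SPEC =====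
-- Pre_ excludes exactly A's ValueError raise paths: flip_after ≤ 0, a direction other than
-- "pos"/"neg", and an even total_row > 1 (odd `needed`, A's "total-row must be odd" raise).
def Pre_build_angle_sequence (total_row : Int) (increase : Int) (flip_after : Int) (direction : String) : Prop :=
  0 < flip_after ∧ (direction = "pos" ∨ direction = "neg") ∧ (total_row ≤ 1 ∨ (total_row - 1) % 2 = 0)
instance (total_row : Int) (increase : Int) (flip_after : Int) (direction : String) : Decidable (Pre_build_angle_sequence total_row increase flip_after direction) := by unfold Pre_build_angle_sequence; infer_instance

def pvWitness_build_angle_sequence : Int × Int × Int × String := (9, 3, 2, "pos")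

def Spec_build_angle_sequence (total_row : Int) (increase : Int) (flip_after : Int) (direction : String) (out : List Int) : Prop := out = build_angle_sequence_alt total_row increase flip_after direction
instance (total_row : Int) (increase : Int) (flip_after : Int) (direction : String) (out : List Int) : Decidable (Spec_build_angle_sequence total_row increase flip_after direction out) := by unfold Spec_build_angle_sequence; infer_instance

-- ===== CLAIM (what is proved, stated in full; the proofs are below) =====
def Claim_equal_build_angle_sequence : Prop := ∀ (total_row : Int) (increase : Int) (flip_after : Int) (direction : String), Dom_build_angle_sequence total_row increase flip_after direction → Pre_build_angle_sequence total_row increase flip_after direction → Spec_build_angle_sequence total_row increase flip_after direction (build_angle_sequence total_row increase flip_after direction)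

-- ===== LEMMAS AND PROOFS =====
-- one sign group: magnitudes base+1 .. base+n, positive then negative (or flipped)
def pvGroup (base n : Int) (dir : String) : List Int :=
  let pos := PySem.List.pyRange (base + 1) (base + n + 1) 1
  if dir = "pos" then pos ++ pos.map (fun x => -x) else pos.map (fun x => -x) ++ pos

-- the same group written with an explicit leading sign s
def pvGroupS (base n s : Int) : List Int :=
  (PySem.List.pyRange (base + 1) (base + n + 1) 1).map (fun x => s * x)
  ++ (PySem.List.pyRange (base + 1) (base + n + 1) 1).map (fun x => -s * x)

lemma pvGroup_eq_S (base n : Int) (dir : String) (hd : dir = "pos" ∨ dir = "neg") :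
    pvGroup base n dir = pvGroupS base n (if dir = "pos" then 1 else -1) := by
  rcases hd with h | h <;> subst h <;> simp [pvGroup, pvGroupS]

lemma pvGroup_zero (base : Int) (dir : String) : pvGroup base 0 dir = [] := by
  simp [pvGroup]

-- ----- A side: the loop computes acc ++ q full groups ++ the half group -----
lemma pvLoopA_nonpos (fuel : Nat) (needed k fa : Int) (dir : String) (acc : List Int)
    (h : needed ≤ 0) : pvLoopA fuel needed k fa dir acc = acc := by
  cases fuel with
  | zero => rfl
  | succ f => rw [pvLoopA, if_neg (by omega)]

lemma pvLoopA_eq (qn : Nat) : ∀ (fuel : Nat) (rem k fa : Int) (dir : String) (acc : List Int),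
    0 < fa → 0 ≤ rem → rem < 2 * fa → rem % 2 = 0 → qn + 2 ≤ fuel →
    pvLoopA fuel (2 * fa * qn + rem) (k + 1) fa dir acc =
      acc ++ ((List.range qn).flatMap fun b : Nat => pvGroup (k + (b : Int) * fa) fa dir)
          ++ pvGroup (k + (qn : Int) * fa) (rem / 2) dir := by
  induction qn with
  | zero =>
    intro fuel rem k fa dir acc hfa h0 h2 he hf
    simp only [Nat.cast_zero, mul_zero, zero_add, List.range_zero, List.flatMap_nil,
      List.append_nil, zero_mul, add_zero]
    by_cases hrem : rem = 0
    · subst hrem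
      rw [pvLoopA_nonpos _ _ _ _ _ _ (by omega)]
      simp [pvGroup_zero]
    · obtain ⟨f, rfl⟩ : ∃ f, fuel = f + 1 := ⟨fuel - 1, by omega⟩
      simp only [pvLoopA]
      rw [if_pos (by omega : (0:Int) < rem), if_neg (by omega : ¬ rem ≥ 2 * fa), if_pos
        (by rw [PySem.Int.mod_eq_emod_of_pos (by omega : (0:Int) < 2)]; exact he)]
      have hfd : PySem.Int.floordiv rem 2 = rem / 2 :=
        PySem.Int.floordiv_eq_ediv_of_pos (by omega)
      have hhalf0 : 0 ≤ rem / 2 := by omega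
      have hhalffa : rem / 2 ≤ fa := by omega
      have hsplit : PySem.List.pyRange (k + 1) (k + 1 + fa) 1
          = PySem.List.pyRange (k + 1) (k + 1 + rem / 2) 1
            ++ PySem.List.pyRange (k + 1 + rem / 2) (k + 1 + fa) 1 :=
        PySem.List.pyRange_one_append _ _ _ (by omega) (by omega)
      have hc : (((rem / 2).toNat : Nat) : Int) = rem / 2 := Int.toNat_of_nonneg hhalf0
      have hslice : PySem.List.slice (PySem.List.pyRange (k + 1) (k + 1 + fa) 1) none
          (some (PySem.Int.floordiv rem 2)) = PySem.List.pyRange (k + 1) (k + 1 + rem / 2) 1 := by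
        rw [hfd, ← hc, PySem.List.slice_to_natCast, hc, hsplit]
        have hlen : (PySem.List.pyRange (k + 1) (k + 1 + rem / 2) 1).length = (rem / 2).toNat := by
          rw [PySem.List.length_pyRange_one]; congr 1; omega
        have := List.take_left (l₁ := PySem.List.pyRange (k + 1) (k + 1 + rem / 2) 1)
          (l₂ := PySem.List.pyRange (k + 1 + rem / 2) (k + 1 + fa) 1)
        rw [hlen] at this; exact this
      rw [hslice, pvLoopA_nonpos _ _ _ _ _ _ (by omega)]
      have hb : k + 1 + rem / 2 = k + rem / 2 + 1 := by ring
      rw [pvGroup]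
      split_ifs <;> simp [hb, List.append_assoc]
  | succ q ih =>
    intro fuel rem k fa dir acc hfa h0 h2 he hf
    obtain ⟨f, rfl⟩ : ∃ f, fuel = f + 1 := ⟨fuel - 1, by omega⟩
    have hq0 : (0:Int) ≤ 2 * fa * (q:Int) := by positivity
    have hneed : 2 * fa * ((q:Nat)+1 : Nat) + rem - 2 * fa = 2 * fa * (q:Nat) + rem := by
      push_cast; ring
    simp only [pvLoopA]
    rw [if_pos (by push_cast; nlinarith : (0:Int) < 2 * fa * ((q:Nat)+1 : Nat) + rem),
      if_pos (by push_cast; nlinarith : 2 * fa * ((q:Nat)+1 : Nat) + rem ≥ 2 * fa), hneed,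
      show k + 1 + fa = (k + fa) + 1 from by ring]
    rw [ih f rem (k + fa) fa dir _ hfa h0 h2 he (by omega)]
    have hmid : (List.range (q+1)).flatMap (fun b : Nat => pvGroup (k + (b:Int) * fa) fa dir)
        = pvGroup k fa dir
          ++ (List.range q).flatMap (fun b : Nat => pvGroup (k + fa + (b:Int) * fa) fa dir) := by
      rw [List.range_succ_eq_map, List.flatMap_cons, List.flatMap_map Nat.succ _ (List.range q)]
      congr 1
      · norm_num
      · apply List.flatMap_congr (fun b _ => ?_)
        congr 1
        push_cast; ring
    have htail : k + fa + (q:Int) * fa = k + ((q:Nat)+1 : Nat) * fa := by push_cast; ring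
    rw [hmid, htail]
    split_ifs with h <;> simp [pvGroup, h, List.append_assoc]

-- ----- B side: the per-index map over a range equals the same groups -----
lemma pvMapSigned (a c n s : Int) (f : Int → Int)
    (hf : ∀ j, a ≤ j → j < a + n → f j = s * (c + (j - a) + 1)) :
    (PySem.List.pyRange a (a + n) 1).map f
      = (PySem.List.pyRange (c + 1) (c + n + 1) 1).map (fun x => s * x) := by
  simp only [PySem.List.pyRange_one, List.map_map]
  rw [show a + n - a = n from by ring, show c + n + 1 - (c + 1) = n from by ring]
  apply List.map_congr_left
  intro k hk
  have hk' : (k : Int) < n := by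
    have := List.mem_range.mp hk; omega
  simp only [Function.comp]
  rw [hf (a + k) (by omega) (by omega)]
  ring

lemma pvMapBlock (cut period fa half first : Int) (b : Int)
    (hfa : 0 < fa) (hper : period = 2 * fa) (hcut : (b + 1) * period ≤ cut) :
    (PySem.List.pyRange (b * period) ((b + 1) * period) 1).map (pvOffsetB cut period fa half first)
      = pvGroupS (b * fa) fa first := by
  have hper0 : (0:Int) < period := by omega
  have hP : (b + 1) * period = b * period + (fa + fa) := by rw [hper]; ring
  have hoff : ∀ j, b * period ≤ j → j < b * period + (fa + fa) →
      PySem.Int.floordiv j period = b ∧ PySem.Int.mod j period = j - b * period ∧ j < cut := by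
    intro j h1 h2
    have hd : PySem.Int.floordiv j period = b := by
      rw [PySem.Int.floordiv_eq_iff_of_pos hper0]
      exact ⟨h1, by omega⟩
    have hm := PySem.Int.floordiv_mul_add_mod j period
    rw [hd] at hm
    exact ⟨hd, by omega, by omega⟩
  rw [show (b + 1) * period = b * period + (fa + fa) from by rw [hper]; ring,
      ← add_assoc,
      PySem.List.pyRange_one_append (b * period) (b * period + fa) (b * period + fa + fa)
        (by omega) (by omega), List.map_append]
  have h1 : (PySem.List.pyRange (b * period) (b * period + fa) 1).map
      (pvOffsetB cut period fa half first)
      = (PySem.List.pyRange (b * fa + 1) (b * fa + fa + 1) 1).map (fun x => first * x) := by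
    apply pvMapSigned
    intro j hj1 hj2
    obtain ⟨hd, hm, hc⟩ := hoff j hj1 (by omega)
    have hr : PySem.Int.mod (j - b * period) fa = j - b * period := by
      rw [PySem.Int.mod_eq_emod_of_pos hfa]
      exact Int.emod_eq_of_lt (by omega) (by omega)
    simp only [pvOffsetB, if_pos hc, hd, hm, hr, if_pos (show j - b * period < fa by omega)]
  have h2 : (PySem.List.pyRange (b * period + fa) (b * period + fa + fa) 1).map
      (pvOffsetB cut period fa half first)
      = (PySem.List.pyRange (b * fa + 1) (b * fa + fa + 1) 1).map (fun x => -first * x) := by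
    apply pvMapSigned
    intro j hj1 hj2
    obtain ⟨hd, hm, hc⟩ := hoff j (by omega) (by omega)
    have hr : PySem.Int.mod (j - b * period) fa = j - b * period - fa := by
      rw [PySem.Int.mod_eq_emod_of_pos hfa, ← Int.sub_emod_right (j - b * period) fa]
      exact Int.emod_eq_of_lt (by omega) (by omega)
    simp only [pvOffsetB, if_pos hc, hd, hm, hr,
      if_neg (show ¬ j - b * period < fa by omega)]
    ring
  rw [h1, h2, pvGroupS]

lemma pvMapFull (fa cut period half first : Int) (hfa : 0 < fa) (hper : period = 2 * fa) :
    ∀ (qn : Nat), (qn : Int) * period ≤ cut →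
    (PySem.List.pyRange 0 ((qn : Int) * period) 1).map (pvOffsetB cut period fa half first)
      = (List.range qn).flatMap (fun b : Nat => pvGroupS ((b : Int) * fa) fa first) := by
  intro qn
  induction qn with
  | zero => intro _; simp [PySem.List.pyRange_one_eq_nil]
  | succ n ih =>
    intro h
    have hper0 : (0:Int) < period := by omega
    push_cast at h ⊢
    have hle : (n:Int) * period ≤ ((n:Int) + 1) * period := by nlinarith
    rw [PySem.List.pyRange_one_append 0 ((n:Int) * period) (((n:Int) + 1) * period)
        (by positivity) hle, List.map_append, ih (by linarith),
      pvMapBlock cut period fa half first (n:Int) hfa hper h,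
      List.range_succ, List.flatMap_append, List.flatMap_cons, List.flatMap_nil, List.append_nil]

lemma pvMapTail (cut period fa half first : Int) (hhalf : 0 ≤ half) :
    (PySem.List.pyRange cut (cut + 2 * half) 1).map (pvOffsetB cut period fa half first)
      = pvGroupS (PySem.Int.floordiv cut 2) half first := by
  by_cases h0 : half = 0
  · subst h0
    simp [pvGroupS, PySem.List.pyRange_one_eq_nil]
  · have hh : 0 < half := by omega
    rw [show cut + 2 * half = cut + half + half from by ring,
      PySem.List.pyRange_one_append cut (cut + half) (cut + half + half) (by omega) (by omega),
      List.map_append]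
    have h1 : (PySem.List.pyRange cut (cut + half) 1).map (pvOffsetB cut period fa half first)
        = (PySem.List.pyRange (PySem.Int.floordiv cut 2 + 1) (PySem.Int.floordiv cut 2 + half + 1) 1).map
            (fun x => first * x) := by
      apply pvMapSigned
      intro j hj1 hj2
      have hr : PySem.Int.mod (j - cut) half = j - cut := by
        rw [PySem.Int.mod_eq_emod_of_pos hh]
        exact Int.emod_eq_of_lt (by omega) (by omega)
      simp only [pvOffsetB, if_neg (show ¬ j < cut by omega), hr,
        if_pos (show j - cut < half by omega)]
    have h2 : (PySem.List.pyRange (cut + half) (cut + half + half) 1).map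
          (pvOffsetB cut period fa half first)
        = (PySem.List.pyRange (PySem.Int.floordiv cut 2 + 1) (PySem.Int.floordiv cut 2 + half + 1) 1).map
            (fun x => -first * x) := by
      apply pvMapSigned
      intro j hj1 hj2
      have hr : PySem.Int.mod (j - cut) half = j - cut - half := by
        rw [PySem.Int.mod_eq_emod_of_pos hh, ← Int.sub_emod_right (j - cut) half]
        exact Int.emod_eq_of_lt (by omega) (by omega)
      simp only [pvOffsetB, if_neg (show ¬ j < cut by omega), hr,
        if_neg (show ¬ j - cut < half by omega)]
      ring
    rw [h1, h2, pvGroupS]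

-- B's whole offset map over 0..needed equals the q full groups plus the half group
lemma pvAltOffsets (fa q rem first : Int) (hfa : 0 < fa) (hq : 0 ≤ q) (hrem0 : 0 ≤ rem) :
    (PySem.List.pyRange 0 (q * (2 * fa) + 2 * (rem / 2)) 1).map
        (pvOffsetB (q * (2 * fa)) (2 * fa) fa (rem / 2) first)
      = ((List.range q.toNat).flatMap fun b : Nat => pvGroupS ((b : Int) * fa) fa first)
        ++ pvGroupS (q * fa) (rem / 2) first := by
  have hhalf0 : 0 ≤ rem / 2 := by omega
  have hq0 : (0:Int) ≤ q * (2 * fa) := by positivity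
  have hqc : ((q.toNat : Nat) : Int) = q := Int.toNat_of_nonneg hq
  rw [PySem.List.pyRange_one_append 0 (q * (2 * fa)) (q * (2 * fa) + 2 * (rem / 2))
      hq0 (by omega), List.map_append]
  rw [show q * (2 * fa) = ((q.toNat : Nat) : Int) * (2 * fa) from by rw [hqc]]
  rw [pvMapFull fa (((q.toNat : Nat) : Int) * (2 * fa)) (2 * fa) (rem / 2) first hfa rfl
      q.toNat (le_refl _)]
  rw [pvMapTail (((q.toNat : Nat) : Int) * (2 * fa)) (2 * fa) fa (rem / 2) first hhalf0]
  have hfd : PySem.Int.floordiv (((q.toNat : Nat) : Int) * (2 * fa)) 2 = q * fa := by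
    rw [PySem.Int.floordiv_eq_ediv_of_pos (by omega : (0:Int) < 2), hqc,
      show q * (2 * fa) = (q * fa) * 2 from by ring]
    exact Int.mul_ediv_cancel _ (by omega)
  rw [hfd]

-- ===== VERDICT =====
theorem build_angle_sequence_spec : Claim_equal_build_angle_sequence := by
  intro tr inc fa dir _ hpre
  obtain ⟨hfa, hdir, hodd⟩ := hpre
  unfold Spec_build_angle_sequence
  simp only [build_angle_sequence, build_angle_sequence_alt]
  rw [if_neg (by omega : ¬ fa ≤ 0), if_neg (by omega : ¬ fa ≤ 0),
    if_neg (not_not_intro hdir), if_neg (not_not_intro hdir)]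
  by_cases hn : tr - 1 ≤ 0
  · rw [pvLoopA_nonpos _ _ _ _ _ _ hn, if_pos hn]
    simp
  · have heven : (tr - 1) % 2 = 0 := hodd.resolve_left (by omega)
    rw [if_neg hn, PySem.Int.mod_eq_emod_of_pos (by omega : (0:Int) < 2),
      if_neg (by omega : ¬ (tr - 1) % 2 = 1)]
    have h2fa : (0:Int) < 2 * fa := by omega
    set q := PySem.Int.floordiv (tr - 1) (2 * fa) with hqdef
    set rem := PySem.Int.mod (tr - 1) (2 * fa) with hremdef
    have hqr : q * (2 * fa) + rem = tr - 1 := PySem.Int.floordiv_mul_add_mod _ _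
    have hrem0 : 0 ≤ rem := PySem.Int.mod_nonneg _ h2fa
    have hrem2 : rem < 2 * fa := PySem.Int.mod_lt _ h2fa
    have hq0 : 0 ≤ q := by nlinarith
    have hre : rem % 2 = 0 := by
      have hd : (2:Int) ∣ rem := by
        have h1 : (2:Int) ∣ (tr - 1) := Int.dvd_of_emod_eq_zero heven
        have h2 : (2:Int) ∣ q * (2 * fa) := ⟨q * fa, by ring⟩
        have : rem = (tr - 1) - q * (2 * fa) := by omega
        rw [this]; exact dvd_sub h1 h2
      exact Int.emod_eq_zero_of_dvd hd
    have hfd : PySem.Int.floordiv rem 2 = rem / 2 :=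
      PySem.Int.floordiv_eq_ediv_of_pos (by omega)
    have hqcast : ((q.toNat : Nat) : Int) = q := Int.toNat_of_nonneg hq0
    have h2q : q * 2 ≤ tr - 1 := by nlinarith
    have hneed : tr - 1 = 2 * fa * ((q.toNat : Nat) : Int) + rem := by rw [hqcast]; linarith [hqr]
    have hq1 : q + 1 ≤ tr - 1 := by nlinarith
    have hfuel : q.toNat + 2 ≤ (tr - 1).toNat + 1 := by omega
    have hA := pvLoopA_eq q.toNat ((tr - 1).toNat + 1) rem 0 fa dir [0] hfa hrem0 hrem2 hre hfuel
    rw [show (0:Int) + 1 = 1 from by ring, ← hneed] at hA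
    simp only [zero_add] at hA
    rw [hA]
    -- rewrite B's arguments into the (q, rem) normal form
    rw [show tr - 1 - (tr - 1 - rem) = rem from by ring, hfd,
      show tr - 1 - rem = q * (2 * fa) from by omega,
      show tr - 1 = q * (2 * fa) + 2 * (rem / 2) from by omega]
    rw [show (PySem.List.pyRange 0 (q * (2 * fa) + 2 * (rem / 2)) 1).map
          (fun j => pvOffsetB (q * (2 * fa)) (2 * fa) fa (rem / 2)
            (if dir = "pos" then 1 else -1) j * inc)
        = ((PySem.List.pyRange 0 (q * (2 * fa) + 2 * (rem / 2)) 1).map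
            (pvOffsetB (q * (2 * fa)) (2 * fa) fa (rem / 2)
              (if dir = "pos" then 1 else -1))).map (fun o => o * inc) from by
          rw [List.map_map]; rfl]
    rw [pvAltOffsets fa q rem _ hfa hq0 hrem0]
    simp only [pvGroup_eq_S _ _ dir hdir, hqcast]
    simp [List.map_append]
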